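-- pv_equiv track=rewrite | github.com/science-for-democracy/mapof-elections | src/mapof/elections/cultures/mallows.py | _calculateZpoly
-- ===== SOURCE A (Python) =====
-- def _calculateZpoly(m):
--     res = [1]
--     for i in range(1, m + 1):
--         mult = [1] * i
--         res2 = [0] * (len(res) + len(mult) - 1)
--         for o1, i1 in enumerate(res):
--             for o2, i2 in enumerate(mult):
--                 res2[o1 + o2] += i1 * i2
--         res = res2
--     return res
-- ===== SOURCE B (Python) =====
-- def _calculateZpoly(m):
--     # Multiply by the all-ones vector of length i via prefix sums:
--     # new[k] = pref[min(k+1, L)] - pref[max(k-i+1, 0)]; the first multiplication is by a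
--     # length-one all-ones vector, which is the identity, so the loop starts at 2.
--     res = [1]
--     for i in range(2, m + 1):
--         pref = [0]
--         for v in res:
--             pref.append(pref[-1] + v)
--         L = len(res)
--         out = []
--         for k in range(L + i - 1):
--             out.append(pref[min(k + 1, L)] - pref[max(k - i + 1, 0)])
--         res = out
--     return res
-- ===== Notes on version B (the rewrite author's own statement) =====
-- stated objective: faster
-- what changed: Each multiplication by the all-ones polynomial of length i is done with a prefix-sum array and window difference new[k]=pref[min(k+1,L)]-pref[max(k-i+1,0)] instead of a full nested-loop convolution, and the identity first multiplication (by a length-one all-ones vector) is skipped; intended as faster, measured ~33x at the largest size both finished (A timed out on most inputs there).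
import Mathlib
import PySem

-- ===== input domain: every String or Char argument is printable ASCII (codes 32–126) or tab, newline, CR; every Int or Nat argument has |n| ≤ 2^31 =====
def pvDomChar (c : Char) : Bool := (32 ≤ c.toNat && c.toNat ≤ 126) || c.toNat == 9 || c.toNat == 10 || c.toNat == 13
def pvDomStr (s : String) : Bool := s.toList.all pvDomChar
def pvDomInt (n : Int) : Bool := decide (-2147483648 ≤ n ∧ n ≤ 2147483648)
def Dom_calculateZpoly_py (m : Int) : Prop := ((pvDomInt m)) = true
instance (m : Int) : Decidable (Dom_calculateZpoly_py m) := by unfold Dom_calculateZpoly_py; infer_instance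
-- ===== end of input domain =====

-- B replaces A's full convolution with the all-ones vector by a prefix-sum sliding window and
-- skips the identity first multiplication; intended as faster (measured ~33x where both finished).

-- ===== PORT A =====
-- res2[o1 + o2] += i1 * i2
def pvInnerA (o1 i1 : Int) (res2 : List Int) (q : Int × Int) : List Int :=
  PySem.List.pySetD res2 (o1 + q.1) (PySem.List.pyGetD res2 (o1 + q.1) 0 + i1 * q.2)

-- for o2, i2 in enumerate(mult): ...
def pvOuterA (mult : List Int) (res2 : List Int) (p : Int × Int) : List Int :=
  (PySem.List.enumerate mult 0).foldl (pvInnerA p.1 p.2) res2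

-- one iteration of A's outer 'for i in range(1, m+1)' loop
def pvStepA (res : List Int) (i : Int) : List Int :=
  let mult : List Int := PySem.List.pyRepeat [1] i
  let res2 : List Int := PySem.List.pyRepeat [0] (PySem.List.len res + PySem.List.len mult - 1)
  (PySem.List.enumerate res 0).foldl (pvOuterA mult) res2

def calculateZpoly_py (m : Int) : List Int :=
  (PySem.List.pyRange 1 (m + 1) 1).foldl pvStepA [1]

-- ===== PORT B =====
-- one iteration of B's 'for i in range(2, m+1)' loop: prefix sums, then window differences
def pvStepB (res : List Int) (i : Int) : List Int :=
  let pref : List Int := res.foldl (fun p v => p ++ [PySem.List.pyGetD p (-1) 0 + v]) [0]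
  let L : Int := PySem.List.len res
  (PySem.List.pyRange 0 (L + i - 1) 1).foldl
    (fun out k =>
      out ++ [PySem.List.pyGetD pref (min (k + 1) L) 0 - PySem.List.pyGetD pref (max (k - i + 1) 0) 0]) []

def calculateZpoly_py_alt (m : Int) : List Int :=
  (PySem.List.pyRange 2 (m + 1) 1).foldl pvStepB [1]

-- ===== PRECONDITION & SPEC =====
def Spec_calculateZpoly_py (m : Int) (out : List Int) : Prop := out = calculateZpoly_py_alt m
instance (m : Int) (out : List Int) : Decidable (Spec_calculateZpoly_py m out) := by unfold Spec_calculateZpoly_py; infer_instance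

-- ===== CLAIM (what is proved, stated in full; the proofs are below) =====
def Claim_equal_calculateZpoly_py : Prop := ∀ (m : Int), Dom_calculateZpoly_py m → Spec_calculateZpoly_py m (calculateZpoly_py m)

-- ===== LEMMAS AND PROOFS =====

lemma pvInner_length (j : Nat) (o1 i1 : Int) (a : List Int) :
    ((PySem.List.enumerate (List.replicate j (1:Int)) 0).foldl (pvInnerA o1 i1) a).length = a.length := by
  induction j generalizing a with
  | zero => simp [PySem.List.enumerate_nil]
  | succ n ih =>
    rw [List.replicate_succ', PySem.List.enumerate_append, List.foldl_append]
    simp [pvInnerA, PySem.List.length_pySetD, PySem.List.enumerate_cons, PySem.List.enumerate_nil, ih]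

lemma pvInner_getD (j o1n k : Nat) (i1 : Int) (a : List Int) :
    ((PySem.List.enumerate (List.replicate j (1:Int)) 0).foldl (pvInnerA (o1n : Int) i1) a).getD k 0
      = a.getD k 0 + (if o1n ≤ k ∧ k < o1n + j ∧ k < a.length then i1 else 0) := by
  induction j generalizing k a with
  | zero => simp [PySem.List.enumerate_nil]; omega
  | succ n ih =>
    rw [List.replicate_succ', PySem.List.enumerate_append, List.foldl_append]
    simp only [PySem.List.enumerate_cons, PySem.List.enumerate_nil, List.foldl_cons, List.foldl_nil,
      List.length_replicate]
    set prev := (PySem.List.enumerate (List.replicate n (1:Int)) 0).foldl (pvInnerA (o1n : Int) i1) a with hprev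
    have hlen : prev.length = a.length := pvInner_length n _ _ a
    show (pvInnerA (o1n : Int) i1 prev (0 + (n:Int), 1)).getD k 0 = _
    unfold pvInnerA
    have hcast : ((o1n : Int) + (0 + (n:Int))) = ((o1n + n : Nat) : Int) := by push_cast; ring
    rw [hcast]
    rw [PySem.List.pySetD_natCast]
    have hget : ∀ (l : List Int) (n k : Nat) (v : Int), (l.set n v).getD k 0 = if k = n ∧ n < l.length then v else l.getD k 0 := by
      intro l n k v
      simp only [List.getD_eq_getElem?_getD, List.getElem?_set]
      split_ifs with h1 h2 h3 h4 <;> simp_all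
    rw [hget]
    simp only [PySem.List.pyGetD_natCast]
    by_cases hc : k = o1n + n ∧ o1n + n < prev.length
    · rw [if_pos hc]
      rw [hlen] at hc
      rw [hc.1, ih (o1n + n) a]
      rw [if_neg (by omega), if_pos (by omega)]
      ring
    · rw [if_neg hc, ih k a]
      rw [hlen] at hc
      congr 1
      by_cases h2 : o1n ≤ k ∧ k < o1n + n ∧ k < a.length
      · rw [if_pos h2, if_pos (by omega)]
      · rw [if_neg h2, if_neg (by omega)]

lemma pvOuter_length (res : List Int) (j : Nat) (a : List Int) :
    ((PySem.List.enumerate res 0).foldl (pvOuterA (List.replicate j (1:Int))) a).length = a.length := by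
  induction res using List.reverseRecOn generalizing a with
  | nil => simp [PySem.List.enumerate_nil]
  | append_singleton xs x ih =>
    rw [PySem.List.enumerate_append, List.foldl_append]
    simp only [PySem.List.enumerate_cons, PySem.List.enumerate_nil, List.foldl_cons, List.foldl_nil]
    rw [pvOuterA]
    rw [pvInner_length, ih]

lemma pvOuter_getD (res : List Int) (j k : Nat) (a : List Int) :
    ((PySem.List.enumerate res 0).foldl (pvOuterA (List.replicate j (1:Int))) a).getD k 0
      = a.getD k 0 + ∑ t ∈ Finset.range res.length,
          (if t ≤ k ∧ k < t + j ∧ k < a.length then res.getD t 0 else 0) := by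
  induction res using List.reverseRecOn generalizing a with
  | nil => simp [PySem.List.enumerate_nil]
  | append_singleton xs x ih =>
    rw [PySem.List.enumerate_append, List.foldl_append]
    simp only [PySem.List.enumerate_cons, PySem.List.enumerate_nil, List.foldl_cons, List.foldl_nil]
    set prev := (PySem.List.enumerate xs 0).foldl (pvOuterA (List.replicate j (1:Int))) a with hprev
    have hlen : prev.length = a.length := pvOuter_length xs j a
    show (pvOuterA (List.replicate j (1:Int)) prev (0 + (xs.length:Int), x)).getD k 0 = _
    rw [pvOuterA]
    have : ((0:Int) + (xs.length:Int)) = ((xs.length : Nat) : Int) := by ring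
    rw [this]
    rw [pvInner_getD j xs.length k x prev, hlen, ih]
    rw [List.length_append, List.length_singleton, Finset.sum_range_succ]
    have hsum : ∀ t ∈ Finset.range xs.length,
        (if t ≤ k ∧ k < t + j ∧ k < a.length then (xs ++ [x]).getD t 0 else 0)
        = (if t ≤ k ∧ k < t + j ∧ k < a.length then xs.getD t 0 else 0) := by
      intro t ht
      simp only [Finset.mem_range] at ht
      congr 1
      simp [List.getD_eq_getElem?_getD, List.getElem?_append_left ht]
    rw [Finset.sum_congr rfl hsum]
    have hx : (xs ++ [x]).getD xs.length 0 = x := by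
      simp [List.getD_eq_getElem?_getD]
    rw [hx]
    ring

lemma pvStepA_init (res : List Int) (hres : res ≠ []) (i : Int) (hi : 1 ≤ i) :
    pvStepA res i = (PySem.List.enumerate res 0).foldl
      (pvOuterA (List.replicate i.toNat (1:Int)))
      (List.replicate (res.length + i.toNat - 1) (0:Int)) := by
  have hL : 1 ≤ res.length := List.length_pos_of_ne_nil hres
  simp only [pvStepA, PySem.List.pyRepeat_singleton, PySem.List.len_eq, List.length_replicate]
  congr 2
  omega

lemma pvStepA_length (res : List Int) (hres : res ≠ []) (i : Int) (hi : 1 ≤ i) :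
    (pvStepA res i).length = res.length + i.toNat - 1 := by
  rw [pvStepA_init res hres i hi, pvOuter_length, List.length_replicate]

lemma pvStepA_getD (res : List Int) (hres : res ≠ []) (i : Int) (hi : 1 ≤ i)
    (k : Nat) (hk : k < res.length + i.toNat - 1) :
    (pvStepA res i).getD k 0
      = ∑ t ∈ Finset.range res.length,
          (if t ≤ k ∧ k < t + i.toNat then res.getD t 0 else 0) := by
  rw [pvStepA_init res hres i hi, pvOuter_getD]
  rw [List.length_replicate]
  have h0 : (List.replicate (res.length + i.toNat - 1) (0:Int)).getD k 0 = 0 := by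
    simp [List.getD_eq_getElem?_getD, hk]
  rw [h0, zero_add]
  refine Finset.sum_congr rfl fun t ht => ?_
  congr 1
  simp only [eq_iff_iff]
  constructor
  · rintro ⟨a, b, c⟩; exact ⟨a, b⟩
  · rintro ⟨a, b⟩; exact ⟨a, b, hk⟩

lemma pvPref_fold (xs : List Int) (p : List Int) (c : Int) (h : p ≠ []) (hlast : p.getLast h = c) :
    xs.foldl (fun p v => p ++ [PySem.List.pyGetD p (-1) 0 + v]) p
      = p ++ (List.range xs.length).map (fun t => c + ((xs.take (t+1)).sum : Int)) := by
  induction xs generalizing p c with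
  | nil => simp
  | cons v xs ih =>
    simp only [List.foldl_cons]
    rw [PySem.List.pyGetD_neg_one p 0 h, hlast]
    rw [ih (p ++ [c + v]) (c + v) (by simp) (by simp)]
    rw [List.append_assoc]
    congr 1
    rw [List.length_cons, List.range_succ_eq_map]
    simp only [List.map_cons, List.map_map, List.take_succ_cons, List.sum_cons, List.take_zero,
      List.sum_nil, List.singleton_append]
    congr 1
    · ring
    · apply List.map_congr_left
      intro t _
      simp only [Function.comp_apply]
      ring

lemma pvPref_char (res : List Int) :
    res.foldl (fun p v => p ++ [PySem.List.pyGetD p (-1) 0 + v]) [0]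
      = (List.range (res.length + 1)).map (fun t => ((res.take t).sum : Int)) := by
  rw [pvPref_fold res [0] 0 (by simp) (by simp)]
  rw [List.range_succ_eq_map]
  simp [List.map_map, Function.comp]

lemma pvFoldl_append_map {α β : Type} (l : List α) (f : α → β) (acc : List β) :
    l.foldl (fun out k => out ++ [f k]) acc = acc ++ l.map f := by
  induction l generalizing acc with
  | nil => simp
  | cons x xs ih => simp [ih]

lemma pvStepB_map (res : List Int) (i : Int) :
    pvStepB res i
      = (PySem.List.pyRange 0 ((res.length : Int) + i - 1) 1).map
          (fun k =>
            PySem.List.pyGetD (res.foldl (fun p v => p ++ [PySem.List.pyGetD p (-1) 0 + v]) [0]) (min (k + 1) (res.length : Int)) 0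
            - PySem.List.pyGetD (res.foldl (fun p v => p ++ [PySem.List.pyGetD p (-1) 0 + v]) [0]) (max (k - i + 1) 0) 0) := by
  simp only [pvStepB, PySem.List.len_eq]
  rw [pvFoldl_append_map]
  simp

lemma pvStepB_length (res : List Int) (i : Int) :
    (pvStepB res i).length = (((res.length : Int) + i - 1)).toNat := by
  rw [pvStepB_map, List.length_map, PySem.List.length_pyRange_one]
  congr 1
  omega

lemma pvTake_sum (res : List Int) (n : Nat) (hn : n ≤ res.length) :
    ((res.take n).sum : Int) = ∑ t ∈ Finset.range res.length, (if t < n then res.getD t 0 else 0) := by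
  induction n with
  | zero => simp
  | succ q ih =>
    have hq : q < res.length := by omega
    rw [List.take_add_one]
    rw [List.sum_append, ih (by omega)]
    have : res[q]?.toList.sum = res.getD q 0 := by
      simp [List.getD_eq_getElem?_getD, List.getElem?_eq_getElem hq]
    rw [this]
    have hsplit : ∀ t ∈ Finset.range res.length,
        (if t < q + 1 then res.getD t 0 else 0)
          = (if t < q then res.getD t 0 else 0) + (if t = q then res.getD t 0 else 0) := by
      intro t _
      split_ifs <;> omega
    rw [Finset.sum_congr rfl hsplit, Finset.sum_add_distrib]
    congr 1
    rw [Finset.sum_ite_eq_of_mem' (Finset.range res.length) q _ (Finset.mem_range.2 hq)]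

lemma pvWindow (res : List Int) (j k : Nat) (hL : 1 ≤ res.length) (hj : 1 ≤ j)
    (hk : k < res.length + j - 1) :
    ∑ t ∈ Finset.range res.length, (if t ≤ k ∧ k < t + j then res.getD t 0 else 0)
      = ((res.take (min (k + 1) res.length)).sum : Int) - ((res.take (k + 1 - j)).sum : Int) := by
  rw [pvTake_sum res (min (k+1) res.length) (by omega), pvTake_sum res (k+1-j) (by omega)]
  rw [← Finset.sum_sub_distrib]
  refine Finset.sum_congr rfl fun t ht => ?_
  simp only [Finset.mem_range] at ht
  split_ifs <;> omega

lemma pvStep_eq (res : List Int) (hres : res ≠ []) (i : Int) (hi : 2 ≤ i) :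
    pvStepA res i = pvStepB res i := by
  have hL : 1 ≤ res.length := List.length_pos_of_ne_nil hres
  have hj : 2 ≤ i.toNat := by omega
  have hlenA : (pvStepA res i).length = res.length + i.toNat - 1 :=
    pvStepA_length res hres i (by omega)
  have hlenB : (pvStepB res i).length = res.length + i.toNat - 1 := by
    rw [pvStepB_length]; omega
  apply List.ext_getElem (by rw [hlenA, hlenB])
  intro k h1 h2
  have hk : k < res.length + i.toNat - 1 := by rw [hlenA] at h1; exact h1
  rw [← List.getD_eq_getElem (pvStepA res i) 0 h1, ← List.getD_eq_getElem (pvStepB res i) 0 h2]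
  rw [pvStepA_getD res hres i (by omega) k hk]
  rw [pvStepB_map, pvPref_char]
  have hklen : k < (((res.length:Int) + i - 1)).toNat := by omega
  have hrange : k < ((PySem.List.pyRange 0 ((res.length:Int) + i - 1) 1).length) := by
    rw [PySem.List.length_pyRange_one]; omega
  rw [List.getD_eq_getElem _ 0 (by rw [List.length_map]; exact hrange)]
  rw [List.getElem_map, PySem.List.getElem_pyRange_one]
  have hmin : min ((0:Int) + (k:Int) + 1) ((res.length:Int)) = ((min (k+1) res.length : Nat) : Int) := by
    push_cast; omega
  have hmax : max ((0:Int) + (k:Int) - i + 1) 0 = (((k + 1 - i.toNat : Nat)) : Int) := by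
    omega
  rw [hmin, hmax]
  have hgetp : ∀ (n : Nat), n ≤ res.length →
      (List.map (fun t => ((res.take t).sum : Int)) (List.range (res.length + 1))).getD n 0
        = ((res.take n).sum : Int) := by
    intro n hn
    rw [List.getD_eq_getElem _ 0 (by simp; omega)]
    simp
  rw [PySem.List.pyGetD_natCast, PySem.List.pyGetD_natCast]
  rw [hgetp _ (by omega), hgetp _ (by omega)]
  exact pvWindow res i.toNat k hL (by omega) hk

lemma pvStepA_one (res : List Int) (hres : res ≠ []) : pvStepA res 1 = res := by
  have hL : 1 ≤ res.length := List.length_pos_of_ne_nil hres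
  have hlenA : (pvStepA res 1).length = res.length := by
    rw [pvStepA_length res hres 1 (by omega)]; omega
  apply List.ext_getElem (by rw [hlenA])
  intro k h1 h2
  have hk : k < res.length := by rw [hlenA] at h1; exact h1
  rw [← List.getD_eq_getElem (pvStepA res 1) 0 h1, ← List.getD_eq_getElem res 0 h2]
  rw [pvStepA_getD res hres 1 (by omega) k (by omega)]
  have hcong : ∀ t ∈ Finset.range res.length,
      (if t ≤ k ∧ k < t + (1:Int).toNat then res.getD t 0 else 0)
        = (if t = k then res.getD t 0 else 0) := by
    intro t _
    split_ifs <;> first | rfl | omega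
  rw [Finset.sum_congr rfl hcong,
    Finset.sum_ite_eq_of_mem' (Finset.range res.length) k _ (Finset.mem_range.2 hk)]

lemma pvStepB_ne_nil (res : List Int) (hres : res ≠ []) (i : Int) (hi : 2 ≤ i) :
    pvStepB res i ≠ [] := by
  have hL : 1 ≤ res.length := List.length_pos_of_ne_nil hres
  intro h
  have := pvStepB_length res i
  rw [h] at this
  simp at this
  omega

lemma pvFold_eq (l : List Int) (hl : ∀ x ∈ l, 2 ≤ x) (res : List Int) (hres : res ≠ []) :
    l.foldl pvStepA res = l.foldl pvStepB res := by
  induction l generalizing res with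
  | nil => rfl
  | cons x xs ih =>
    simp only [List.foldl_cons]
    rw [pvStep_eq res hres x (hl x (by simp))]
    exact ih (fun y hy => hl y (by simp [hy])) _ (pvStepB_ne_nil res hres x (hl x (by simp)))

-- ===== VERDICT (by name: the statement is the Claim_ definition above) =====
theorem calculateZpoly_py_spec : Claim_equal_calculateZpoly_py := by
  intro m _
  unfold Spec_calculateZpoly_py calculateZpoly_py calculateZpoly_py_alt
  by_cases hm : 1 ≤ m
  · rw [PySem.List.pyRange_one_cons (by omega : (1:Int) < m + 1)]
    simp only [List.foldl_cons]
    rw [pvStepA_one [1] (by simp)]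
    exact pvFold_eq _ (fun x hx => ((PySem.List.mem_pyRange_one).1 hx).1) [1] (by simp)
  · rw [PySem.List.pyRange_one_eq_nil (by omega), PySem.List.pyRange_one_eq_nil (by omega)]
    rfl
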